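-- pv_equiv track=rewrite | github.com/pedroalexleite/BCS-FCUP | Artificial Intelligence/Project 4/utils.py | diabaixo
-- ===== SOURCE A (Python) =====
-- def diabaixo(cur, i, j, k, ch):
--     if k == 0:
--         return True
--     if i == 6 or j == 7:
--         return False
--     if ch == cur[i][j]:
--         return True and diabaixo(cur, i + 1, j + 1, k - 1, ch)
--     else:
--         return False
-- ===== SOURCE B (Python) =====
-- def diabaixo(cur, i, j, k, ch):
--     while k != 0:
--         if i == 6 or j == 7 or cur[i][j] != ch:
--             return False
--         i, j, k = i + 1, j + 1, k - 1
--     return True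
-- ===== Notes on version B (the rewrite author's own statement) =====
-- stated objective: simpler
-- what changed: B replaces A's tail recursion by a plain iterative while-loop over mutable (i, j, k) with the three stopping tests merged into one short-circuit guard; Pre_ excludes only the inputs on which both programs raise IndexError (the diagonal walk steps to an index outside the board before any stopping rule fires).
import Mathlib
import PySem

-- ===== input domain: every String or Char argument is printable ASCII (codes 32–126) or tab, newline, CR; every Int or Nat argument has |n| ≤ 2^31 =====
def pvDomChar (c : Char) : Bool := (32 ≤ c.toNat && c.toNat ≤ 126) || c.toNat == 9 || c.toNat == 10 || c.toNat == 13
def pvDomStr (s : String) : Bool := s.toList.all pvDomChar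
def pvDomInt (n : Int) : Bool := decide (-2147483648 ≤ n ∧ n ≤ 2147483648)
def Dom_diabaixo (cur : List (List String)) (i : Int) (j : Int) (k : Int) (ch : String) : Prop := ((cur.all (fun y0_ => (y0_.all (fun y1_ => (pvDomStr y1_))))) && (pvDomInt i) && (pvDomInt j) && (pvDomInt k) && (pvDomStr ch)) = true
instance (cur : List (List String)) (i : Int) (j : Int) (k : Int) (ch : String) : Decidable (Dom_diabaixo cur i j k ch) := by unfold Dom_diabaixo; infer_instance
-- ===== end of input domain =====

-- B rewrites A's tail recursion as an iterative while-loop over mutable (i, j, k) with the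
-- stopping tests merged into one short-circuit guard (objective: simpler; equal on Pre_).

-- ===== PORT A =====
theorem pv_lt_of_pyGet?_some {α : Type} {xs : List α} {i : Int} {x : α}
    (h : PySem.List.pyGet? xs i = some x) : i < (xs.length : Int) := by
  by_contra hn
  have : PySem.List.pyGet? xs i = none := by
    rw [PySem.List.pyGet?_eq_none_iff, PySem.Raise.InRange]
    omega
  simp [this] at h

def diabaixo (cur : List (List String)) (i : Int) (j : Int) (k : Int) (ch : String) : Bool :=
  if k = 0 then true
  else if i = 6 ∨ j = 7 then false
  else
    match hrow : PySem.List.pyGet? cur i with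
    | none => false       -- Python raises IndexError here (outside Pre_)
    | some row =>
      match PySem.List.pyGet? row j with
      | none => false     -- Python raises IndexError here (outside Pre_)
      | some c =>
        if ch = c then diabaixo cur (i + 1) (j + 1) (k - 1) ch else false
termination_by ((cur.length : Int) - i).toNat
decreasing_by
  have := pv_lt_of_pyGet?_some hrow
  omega

-- ===== PORT B =====
-- the cell cur[i][j] as Python evaluates it (none = IndexError)
def pvCell (cur : List (List String)) (i : Int) (j : Int) : Option String :=
  (PySem.List.pyGet? cur i).bind (fun row => PySem.List.pyGet? row j)

-- B's while-loop: state (i, j, k) evolves; cur and ch are fixed throughout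
def pvLoop (cur : List (List String)) (ch : String) (i j k : Int) : Bool :=
  if k ≠ 0 then
    if i = 6 ∨ j = 7 then false
    else match hc : pvCell cur i j with
      | none => false     -- Python raises IndexError here (outside Pre_)
      | some c =>
        if c ≠ ch then false
        else pvLoop cur ch (i + 1) (j + 1) (k - 1)
  else true
termination_by ((cur.length : Int) - i).toNat
decreasing_by
  rcases Option.bind_eq_some_iff.mp hc with ⟨row, hrow, _⟩
  have := pv_lt_of_pyGet?_some hrow
  omega

def diabaixo_alt (cur : List (List String)) (i : Int) (j : Int) (k : Int) (ch : String) : Bool :=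
  pvLoop cur ch i j k

-- ===== PRECONDITION & SPEC =====
-- Pre_: exactly the inputs on which Python A RETURNS (rather than raising IndexError):
-- some stopping rule — the count k running out, the row hitting 6, the column hitting 7,
-- or a mismatching cell — fires before the diagonal walk steps outside the board.
def Pre_diabaixo (cur : List (List String)) (i : Int) (j : Int) (k : Int) (ch : String) : Prop :=
  ∃ t : Nat, t ≤ 2 * cur.length ∧
    (∀ s : Nat, s < t → (k ≠ (s : Int) ∧ i + s ≠ 6 ∧ j + s ≠ 7 ∧ pvCell cur (i + s) (j + s) = some ch)) ∧
    (k = (t : Int) ∨ i + t = 6 ∨ j + t = 7 ∨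
      (pvCell cur (i + t) (j + t) ≠ none ∧ pvCell cur (i + t) (j + t) ≠ some ch))
instance (cur : List (List String)) (i : Int) (j : Int) (k : Int) (ch : String) : Decidable (Pre_diabaixo cur i j k ch) := by unfold Pre_diabaixo; infer_instance

def pvWitness_diabaixo : List (List String) × Int × Int × Int × String := ([["a"]], 0, 0, 1, "a")

def Spec_diabaixo (cur : List (List String)) (i : Int) (j : Int) (k : Int) (ch : String) (out : Bool) : Prop := out = diabaixo_alt cur i j k ch
instance (cur : List (List String)) (i : Int) (j : Int) (k : Int) (ch : String) (out : Bool) : Decidable (Spec_diabaixo cur i j k ch out) := by unfold Spec_diabaixo; infer_instance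

-- ===== CLAIM (what is proved, stated in full; the proofs are below) =====
def Claim_equal_diabaixo : Prop := ∀ (cur : List (List String)) (i : Int) (j : Int) (k : Int) (ch : String), Dom_diabaixo cur i j k ch → Pre_diabaixo cur i j k ch → Spec_diabaixo cur i j k ch (diabaixo cur i j k ch)

-- ===== LEMMAS AND PROOFS =====

-- pvLoop's one-step unfolding with a non-dependent match (the port names the discriminant
-- equation only for its termination proof)
theorem pvLoop_eq (cur : List (List String)) (ch : String) (i j k : Int) :
    pvLoop cur ch i j k =
      if k ≠ 0 then
        if i = 6 ∨ j = 7 then false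
        else match pvCell cur i j with
          | none => false
          | some c => if c ≠ ch then false else pvLoop cur ch (i + 1) (j + 1) (k - 1)
      else true := by
  rw [pvLoop]
  split
  · split
    · rfl
    · cases pvCell cur i j <;> rfl
  · rfl

-- the main equivalence: A's recursion equals B's loop, on EVERY input
theorem pv_eq (cur : List (List String)) (i j k : Int) (ch : String) :
    diabaixo cur i j k ch = pvLoop cur ch i j k := by
  fun_induction diabaixo cur i j k ch with
  | case1 i j =>
    rw [pvLoop_eq]; simp
  | case2 i j k hk hg =>
    rw [pvLoop_eq]; simp [hk, hg]
  | case3 i j k hk hg hrow =>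
    have hc : pvCell cur i j = none := by simp [pvCell, hrow]
    rw [pvLoop_eq]; simp [hk, hg, hc]
  | case4 i j k hk hg row hrow hcol =>
    have hc : pvCell cur i j = none := by simp [pvCell, hrow, hcol]
    rw [pvLoop_eq]; simp [hk, hg, hc]
  | case5 i j k hk hg row hrow hcol ih =>
    have hc : pvCell cur i j = some ch := by simp [pvCell, hrow, hcol]
    rw [pvLoop_eq]; simp [hk, hg, hc, ih]
  | case6 i j k hk hg row hrow c hcol hne =>
    have hc : pvCell cur i j = some c := by simp [pvCell, hrow, hcol]
    have hne' : c ≠ ch := fun h => hne h.symm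
    rw [pvLoop_eq]; simp [hk, hg, hc, hne']

-- ===== VERDICT (by name: the statement is the Claim_ definition above) =====
theorem diabaixo_spec : Claim_equal_diabaixo := by
  intro cur i j k ch _ _
  unfold Spec_diabaixo diabaixo_alt
  exact pv_eq cur i j k ch
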